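-- pv_equiv track=rewrite | github.com/oo89/CS100_PythonHW | HW10.py | initialLetterCount
-- ===== SOURCE A (Python) =====
-- def initialLetterCount(wordList):
--     returnDic={}
--     for word in wordList:
--         firstLetter = word[0]
--         if firstLetter in returnDic:
--             returnDic[firstLetter] += 1
--         else:
--             returnDic[firstLetter] = 1
--     return returnDic
-- ===== SOURCE B (Python) =====
-- def initialLetterCount(wordList):
--     firsts = [word[0] for word in wordList]
--     counts = {}
--     for c in firsts:
--         if c not in counts:
--             counts[c] = firsts.count(c)
--     return counts
-- ===== Notes on version B (the rewrite author's own statement) =====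
-- stated objective: alternative
-- what changed: B extracts the first letters in one pass, then for each letter seen for the first time records its total count via list.count, instead of A's incremental hash accumulation (+1 per word).
import Mathlib
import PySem

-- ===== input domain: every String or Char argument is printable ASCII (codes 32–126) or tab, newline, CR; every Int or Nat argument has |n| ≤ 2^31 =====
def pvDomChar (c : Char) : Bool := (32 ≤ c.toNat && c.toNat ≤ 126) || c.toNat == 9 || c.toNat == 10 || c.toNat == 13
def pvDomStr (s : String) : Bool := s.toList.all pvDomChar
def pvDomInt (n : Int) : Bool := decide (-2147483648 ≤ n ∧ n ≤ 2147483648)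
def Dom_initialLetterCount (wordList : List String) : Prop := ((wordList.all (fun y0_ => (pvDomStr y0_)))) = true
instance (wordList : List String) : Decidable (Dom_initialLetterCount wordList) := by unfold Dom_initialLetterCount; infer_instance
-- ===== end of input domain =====

-- B counts each distinct first letter once via list.count over the extracted first letters
-- (first-occurrence order preserved), instead of A's per-word incremental dict accumulation.
-- Equivalence is proved on lists without empty-string words (Pre_), where Python A raises IndexError.


-- ===== PORT A =====
-- A raises IndexError on an empty-string word (word[0]); under Pre_ below pyFirst's
-- none-branch is unreachable.  word[0] is the 1-character string of the first char.
def pyFirst (w : String) : String :=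
  match PySem.Str.pyGet? w 0 with
  | some c => String.ofList [c]
  | none => ""

def initialLetterCount (wordList : List String) : List (String × Int) :=
  (wordList.foldl (fun returnDic word =>
    let firstLetter := pyFirst word
    match PySem.Dict.get? returnDic firstLetter with
    | some n => PySem.Dict.insert returnDic firstLetter (n + 1)
    | none => PySem.Dict.insert returnDic firstLetter (1 : Int))
    (PySem.Dict.empty : PySem.Dict String Int)).items

-- ===== PORT B =====
def initialLetterCount_alt (wordList : List String) : List (String × Int) :=
  let firsts := wordList.map pyFirst
  (firsts.foldl (fun counts c =>
    if PySem.Dict.contains counts c then counts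
    else PySem.Dict.insert counts c ((PySem.List.count firsts c : Nat) : Int))
    PySem.Dict.empty).items

-- ===== PRECONDITION & SPEC =====
-- Pre_ excludes exactly the inputs on which the Python A raises IndexError: a list
-- containing an empty-string word.
def Pre_initialLetterCount (wordList : List String) : Prop := ∀ w ∈ wordList, w ≠ ""
instance (wordList : List String) : Decidable (Pre_initialLetterCount wordList) := by
  unfold Pre_initialLetterCount; infer_instance

def pvWitness_initialLetterCount : List String := ["apple", "ant", "bee"]

def Spec_initialLetterCount (wordList : List String) (out : List (String × Int)) : Prop := out = initialLetterCount_alt wordList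
instance (wordList : List String) (out : List (String × Int)) : Decidable (Spec_initialLetterCount wordList out) := by unfold Spec_initialLetterCount; infer_instance

-- ===== CLAIM (what is proved, stated in full; the proofs are below) =====
def Claim_equal_initialLetterCount : Prop := ∀ (wordList : List String), Dom_initialLetterCount wordList → Pre_initialLetterCount wordList → Spec_initialLetterCount wordList (initialLetterCount wordList)

-- ===== LEMMAS AND PROOFS =====

-- A's branch on membership is exactly 'insert the old count (default 0) plus one'.
lemma stepA_eq (d : PySem.Dict String Int) (c : String) :
    (match PySem.Dict.get? d c with
      | some n => PySem.Dict.insert d c (n + 1)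
      | none => PySem.Dict.insert d c 1) = PySem.Dict.insert d c (PySem.Dict.getD d c 0 + 1) := by
  cases h : PySem.Dict.get? d c with
  | none => simp [PySem.Dict.getD_of_get?_eq_none d 0 h]
  | some n => simp [PySem.Dict.getD_of_get?_eq_some d 0 h]

-- A's result in closed form: first-occurrence order, count in the whole list.
lemma portA_items (wordList : List String) :
    initialLetterCount wordList =
      (PySem.Set.ofList (wordList.map pyFirst)).map
        (fun k => (k, ((wordList.map pyFirst).count k : Int))) := by
  unfold initialLetterCount
  rw [show (fun (returnDic : PySem.Dict String Int) (word : String) =>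
        let firstLetter := pyFirst word
        match PySem.Dict.get? returnDic firstLetter with
        | some n => PySem.Dict.insert returnDic firstLetter (n + 1)
        | none => PySem.Dict.insert returnDic firstLetter (1 : Int))
      = (fun returnDic word => PySem.Dict.insert returnDic (pyFirst word)
          (PySem.Dict.getD returnDic (pyFirst word) 0 + 1)) from
      funext fun d => funext fun w => stepA_eq d (pyFirst w)]
  rw [← List.foldl_map (f := pyFirst)
      (g := fun (d : PySem.Dict String Int) k => PySem.Dict.insert d k (PySem.Dict.getD d k 0 + 1))]
  rw [PySem.Dict.foldl_insert_getD_add_one_eq_counter, PySem.Dict.items_counter]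

-- B's loop, started from any already-recorded set s of letters, extends first-occurrence
-- order with whole-list counts.
lemma portB_fold (F : List String) (P : List String) : ∀ (s : List String),
    (P.foldl (fun counts c =>
        if PySem.Dict.contains counts c then counts
        else PySem.Dict.insert counts c ((PySem.List.count F c : Nat) : Int))
      (PySem.Dict.mk (s.map (fun k => (k, ((PySem.List.count F k : Nat) : Int)))))).items
    = (P.foldl PySem.Set.add s).map (fun k => (k, ((PySem.List.count F k : Nat) : Int))) := by
  induction P with
  | nil => intro s; rfl
  | cons c P ih =>
    intro s
    have hc : PySem.Dict.contains
        (PySem.Dict.mk (s.map (fun k => (k, ((PySem.List.count F k : Nat) : Int))))) c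
        = PySem.Set.contains s c := by
      simp [PySem.Dict.contains_eq_decide_mem_keys, PySem.Dict.keys, PySem.Set.contains]
    simp only [List.foldl_cons, hc, PySem.Set.add]
    by_cases hm : PySem.Set.contains s c = true
    · simp only [hm, if_true]
      exact ih s
    · simp only [eq_false_of_ne_true hm, if_false, Bool.false_eq_true]
      have hins : (PySem.Dict.mk (s.map (fun k => (k, ((PySem.List.count F k : Nat) : Int))))).insert
          c ((PySem.List.count F c : Nat) : Int)
          = PySem.Dict.mk ((s ++ [c]).map (fun k => (k, ((PySem.List.count F k : Nat) : Int)))) := by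
        apply PySem.Dict.ext
        rw [PySem.Dict.items_insert_of_not_contains _ _ (by rw [hc]; exact eq_false_of_ne_true hm)]
        simp
      rw [hins]
      exact ih (s ++ [c])
  
-- ===== VERDICT (by name: the statement is the Claim_ definition above) =====
theorem initialLetterCount_spec : Claim_equal_initialLetterCount := by
  intro wordList _ _
  unfold Spec_initialLetterCount initialLetterCount_alt
  rw [portA_items]
  have := portB_fold (wordList.map pyFirst) (wordList.map pyFirst) []
  simp only [List.map_nil] at this
  rw [show (PySem.Dict.empty : PySem.Dict String Int) = PySem.Dict.mk ([] : List (String × Int)) from rfl] at *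
  rw [this, ← PySem.Set.ofList_eq_foldl]
  simp [PySem.List.count_eq]
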